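-- pv_equiv track=rewrite | github.com/Ilya758/leetcode-sltns | bitManipulation/easy/findKOr.py | findKOr
-- ===== SOURCE A (Python) =====
-- def findKOr(nums: list[int], k: int) -> int:
--     ans = 0
--
--     for i in range(32):
--         c = 0
--         mask = 1 << i
--
--         for j in nums:
--             if j & mask:
--                 c += 1
--
--         if c >= k:
--             ans |= mask
--     return ans
-- ===== SOURCE B (Python) =====
-- def findKOr(nums: list[int], k: int) -> int:
--     def go(xs, b):
--         if b == 0:
--             return 0
--         c = sum(x & 1 for x in xs)
--         low = 1 if c >= k else 0
--         return low | (go([x >> 1 for x in xs], b - 1) << 1)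
--
--     return go([num & 0xFFFFFFFF for num in nums], 32)
-- ===== Notes on version B (the rewrite author's own statement) =====
-- stated objective: alternative
-- what changed: B replaces A's 32 mask-and-rescan passes (each selecting bit i with a fresh mask) by a recursive low-bit decomposition: mask every number to its low 32 bits once, then recurse 32 times testing only the parity (x & 1) of each residual and right-shifting the whole list, assembling the answer as low | (rest << 1).
import Mathlib
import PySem

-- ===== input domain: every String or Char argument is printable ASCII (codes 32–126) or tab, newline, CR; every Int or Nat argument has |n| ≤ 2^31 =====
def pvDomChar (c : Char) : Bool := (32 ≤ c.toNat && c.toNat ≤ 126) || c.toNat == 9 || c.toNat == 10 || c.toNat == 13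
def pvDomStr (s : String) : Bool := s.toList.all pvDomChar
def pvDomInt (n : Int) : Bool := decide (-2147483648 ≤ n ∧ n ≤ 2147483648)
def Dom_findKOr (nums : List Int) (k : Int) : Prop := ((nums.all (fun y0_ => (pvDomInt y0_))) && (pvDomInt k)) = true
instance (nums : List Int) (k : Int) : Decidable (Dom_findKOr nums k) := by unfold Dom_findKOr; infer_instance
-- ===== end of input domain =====

-- B replaces A's per-bit mask-and-rescan passes by a recursive low-bit decomposition:
-- mask each number to its low 32 bits once, then recurse testing only the parity of the
-- residuals and right-shifting the list, assembling the answer as low | (rest << 1) (alternative).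


-- ===== PORT A =====
def findKOr (nums : List Int) (k : Int) : Int :=
  (PySem.List.pyRange 0 32).foldl (fun ans i =>
    let mask : Int := (1 : Int) <<< i.toNat
    let c := nums.foldl (fun c j => if PySem.Int.band j mask ≠ 0 then c + 1 else c) (0 : Int)
    if c ≥ k then PySem.Int.bor ans mask else ans) 0

-- ===== PORT B =====
-- helper go(xs, b) of Source B: b counts the remaining bits (32 down to 0), a Nat
def findKOrGo (k : Int) (xs : List Int) : Nat → Int
  | 0 => 0
  | b + 1 =>
    let c : Int := (xs.map (fun x => PySem.Int.band x 1)).sum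
    let low : Int := if c ≥ k then 1 else 0
    PySem.Int.bor low (findKOrGo k (xs.map (fun x : Int => x >>> (1 : Nat))) b <<< 1)

def findKOr_alt (nums : List Int) (k : Int) : Int :=
  findKOrGo k (nums.map (fun num => PySem.Int.band num 4294967295)) 32

-- ===== PRECONDITION & SPEC =====
def Spec_findKOr (nums : List Int) (k : Int) (out : Int) : Prop := out = findKOr_alt nums k
instance (nums : List Int) (k : Int) (out : Int) : Decidable (Spec_findKOr nums k out) := by unfold Spec_findKOr; infer_instance

-- ===== CLAIM (what is proved, stated in full; the proofs are below) =====
def Claim_equal_findKOr : Prop := ∀ (nums : List Int) (k : Int), Dom_findKOr nums k → Spec_findKOr nums k (findKOr nums k)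

-- ===== LEMMAS AND PROOFS =====

-- Nat model of B's recursion
def pvGN (k : Int) (ns : List Nat) : Nat → Nat
  | 0 => 0
  | b + 1 =>
    (if k ≤ (((ns.map (fun n => n &&& 1)).sum : Nat) : Int) then 1 else 0) |||
      (pvGN k (ns.map (fun n => n >>> 1)) b <<< 1)

-- Nat model of A's loop
def pvFA (k : Int) (ns : List Nat) (m : Nat) : Nat :=
  (List.range m).foldl (fun a i =>
    if k ≤ ((ns.countP (fun n => n.testBit i) : Nat) : Int) then a ||| (1 <<< i) else a) 0

lemma pv_sum_and_one (ns : List Nat) :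
    (ns.map (fun n => n &&& 1)).sum = ns.countP (fun n => n.testBit 0) := by
  induction ns with
  | nil => simp
  | cons n t ih =>
      rw [List.map_cons, List.sum_cons, List.countP_cons, ih, Nat.and_one_is_mod]
      rcases Nat.mod_two_eq_zero_or_one n with h | h <;>
        simp [Nat.testBit_zero, h, Nat.add_comm]

lemma pv_lift_go (k : Int) (b : Nat) (ns : List Nat) :
    findKOrGo k (List.map (fun n => ((n : Nat) : Int)) ns) b = ((pvGN k ns b : Nat) : Int) := by
  induction b generalizing ns with
  | zero => simp [findKOrGo, pvGN]
  | succ b ih =>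
      simp only [findKOrGo, pvGN, List.map_map]
      have hc : List.map ((fun x => PySem.Int.band x 1) ∘ fun n : Nat => (n : Int)) ns
          = List.map (fun n : Nat => ((n &&& 1 : Nat) : Int)) ns :=
        List.map_congr_left fun n _ => by exact_mod_cast PySem.Int.band_natCast n 1
      have hs : List.map ((fun x : Int => x >>> (1 : Nat)) ∘ fun n : Nat => (n : Int)) ns
          = List.map (fun n : Nat => ((n : Nat) : Int)) (ns.map (fun n => n >>> 1)) := by
        rw [List.map_map]; rfl
      rw [hc, hs, ih]
      rw [show (List.map (fun n : Nat => ((n &&& 1 : Nat) : Int)) ns).sum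
          = (((ns.map (fun n => n &&& 1)).sum : Nat) : Int) by
        rw [Nat.cast_list_sum, List.map_map]; rfl]
      simp only [ge_iff_le]
      generalize pvGN k (List.map (fun n => n >>> 1) ns) b = g
      generalize ((ns.map (fun n => n &&& 1)).sum : Nat) = S
      by_cases hk : k ≤ ((S : Nat) : Int)
      · rw [if_pos hk, if_pos hk]
        exact PySem.Int.bor_natCast 1 (g <<< 1)
      · rw [if_neg hk, if_neg hk]
        exact PySem.Int.bor_natCast 0 (g <<< 1)

lemma pv_gN_testBit (k : Int) (b : Nat) (ns : List Nat) (j : Nat) :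
    (pvGN k ns b).testBit j
      = (decide (j < b) && decide (k ≤ ((ns.countP (fun n => n.testBit j) : Nat) : Int))) := by
  induction b generalizing ns j with
  | zero => simp [pvGN]
  | succ b ih =>
      rw [pvGN, Nat.testBit_lor, Nat.testBit_shiftLeft, pv_sum_and_one]
      cases j with
      | zero =>
          by_cases hk : k ≤ ((ns.countP (fun n => n.testBit 0) : Nat) : Int) <;>
            simp <;> split <;> simp_all
      | succ j =>
          have hlow : (if k ≤ ((ns.countP (fun n => n.testBit 0) : Nat) : Int)
              then 1 else 0 : Nat).testBit (j + 1) = false := by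
            split <;> simp [Nat.testBit_succ]
          rw [hlow, ih]
          simp only [Nat.add_sub_cancel]
          have hcnt : (ns.map (fun n => n >>> 1)).countP (fun n => n.testBit j)
              = ns.countP (fun n => n.testBit (j + 1)) := by
            rw [List.countP_map]
            apply List.countP_congr
            intro n _
            simp [Function.comp, Nat.testBit_shiftRight, Nat.add_comm]
          rw [hcnt]
          simp

lemma pv_fA_testBit (k : Int) (ns : List Nat) (m : Nat) (j : Nat) :
    (pvFA k ns m).testBit j
      = (decide (j < m) && decide (k ≤ ((ns.countP (fun n => n.testBit j) : Nat) : Int))) := by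
  induction m with
  | zero => simp [pvFA]
  | succ m ih =>
      rw [pvFA, List.range_succ, List.foldl_append, List.foldl_cons, List.foldl_nil]
      rw [show (List.range m).foldl (fun a i =>
          if k ≤ ((ns.countP (fun n => n.testBit i) : Nat) : Int) then a ||| (1 <<< i) else a) 0
          = pvFA k ns m from rfl]
      have h1 : ∀ t, Nat.testBit 1 t = decide (t = 0) := by
        intro t; cases t <;> simp [Nat.testBit_succ]
      by_cases hm : k ≤ ((ns.countP (fun n => n.testBit m) : Nat) : Int)
      · rw [if_pos hm, Nat.testBit_lor, Nat.testBit_shiftLeft, ih]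
        by_cases hj : j = m
        · subst hj
          simp [hm]
        · by_cases hjm : j < m
          · simp [h1, hjm, show j < m + 1 by omega, show ¬ (j ≥ m) by omega]
          · simp [h1, hjm, show ¬ (j < m + 1) by omega, show ¬ (j - m = 0) by omega]
      · rw [if_neg hm, ih]
        by_cases hj : j = m
        · subst hj
          simp [hm]
        · by_cases hjm : j < m
          · simp [hjm, show j < m + 1 by omega]
          · simp [hjm, show ¬ (j < m + 1) by omega]

lemma pv_bridge (x : Int) (i : Nat) (hi : i < 32) :
    (decide (PySem.Int.band x ((1 : Int) <<< i) ≠ 0))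
      = ((PySem.Int.band x 4294967295).toNat).testBit i := by
  have hmask : (4294967295 : Int) = (((2^32 - 1 : Nat) : Nat) : Int) := by norm_num
  have hp : ((1 : Int) <<< i) = (((2^i : Nat) : Nat) : Int) := by
    rw [show (1:Int) <<< i = ((1 <<< i : Nat) : Int) from rfl, Nat.one_shiftLeft]
  by_cases hx : 0 ≤ x
  · rw [hp, hmask, PySem.Int.band_of_nonneg hx (by positivity),
      PySem.Int.band_of_nonneg hx (by positivity), Int.toNat_natCast, Int.toNat_natCast,
      Int.toNat_natCast, Nat.and_two_pow_sub_one_eq_mod, Nat.testBit_mod_two_pow,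
      Nat.and_two_pow]
    rcases Bool.eq_false_or_eq_true (x.toNat.testBit i) with h | h <;>
      simp [h, hi]
  · have hxn : ¬ (0 ≤ x) := hx
    have h2 : (0:Int) ≤ (((2^i : Nat) : Nat) : Int) := by positivity
    have h3 : (0:Int) ≤ (((2^32 - 1 : Nat) : Nat) : Int) := by positivity
    rw [hp, hmask]
    rw [show PySem.Int.band x (((2^i : Nat) : Nat) : Int)
        = (((((2^i : Nat) : Nat) : Int).toNat - ((((2^i : Nat) : Nat) : Int).toNat &&& (-x - 1).toNat) : Nat) : Int) by
      rw [PySem.Int.band]; rw [if_neg hxn, if_pos h2]]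
    rw [show PySem.Int.band x (((2^32 - 1 : Nat) : Nat) : Int)
        = (((((2^32 - 1 : Nat) : Nat) : Int).toNat - ((((2^32 - 1 : Nat) : Nat) : Int).toNat &&& (-x - 1).toNat) : Nat) : Int) by
      rw [PySem.Int.band]; rw [if_neg hxn, if_pos h3]]
    rw [Int.toNat_natCast, Int.toNat_natCast, Int.toNat_natCast]
    set n := (-x - 1).toNat with hn
    rw [Nat.and_comm (2^i) n, Nat.and_two_pow, Nat.and_comm (2^32 - 1) n,
      Nat.and_two_pow_sub_one_eq_mod]
    have hr : n % 2^32 < 2^32 := Nat.mod_lt _ (by positivity)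
    have hsub : 2^32 - 1 - n % 2^32 = 2^32 - (n % 2^32 + 1) := by omega
    rw [hsub, Nat.testBit_two_pow_sub_succ hr, Nat.testBit_mod_two_pow]
    rcases Bool.eq_false_or_eq_true (n.testBit i) with h | h <;>
      simp [h, hi]

lemma pv_lift_A_aux (nums : List Int) (k : Int) (m : Nat) (hm : m ≤ 32) :
    (List.range m).foldl (fun ans (i : Nat) =>
      let mask : Int := (1 : Int) <<< ((i : Int)).toNat
      let c := nums.foldl (fun c j => if PySem.Int.band j mask ≠ 0 then c + 1 else c) (0 : Int)
      if c ≥ k then PySem.Int.bor ans mask else ans) 0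
    = ((pvFA k (nums.map (fun x => (PySem.Int.band x 4294967295).toNat)) m : Nat) : Int) := by
  induction m with
  | zero => simp [pvFA]
  | succ m ih =>
      rw [List.range_succ, List.foldl_append, List.foldl_cons, List.foldl_nil,
        ih (by omega)]
      conv_rhs => rw [pvFA, List.range_succ, List.foldl_append, List.foldl_cons, List.foldl_nil]
      rw [show (List.range m).foldl (fun a i =>
          if k ≤ (((nums.map (fun x => (PySem.Int.band x 4294967295).toNat)).countP
            (fun n => n.testBit i) : Nat) : Int) then a ||| (1 <<< i) else a) 0
          = pvFA k (nums.map (fun x => (PySem.Int.band x 4294967295).toNat)) m from rfl]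
      have hcount : nums.foldl (fun c j =>
          if PySem.Int.band j ((1:Int) <<< ((m : Int)).toNat) ≠ 0 then c + 1 else c) (0 : Int)
          = (((nums.map (fun x => (PySem.Int.band x 4294967295).toNat)).countP
              (fun n => n.testBit m) : Nat) : Int) := by
        have h := PySem.List.foldl_count_if
          (fun j => decide (PySem.Int.band j ((1:Int) <<< ((m : Int)).toNat) ≠ 0)) nums 0
        simp only [decide_eq_true_eq, zero_add] at h
        rw [h, List.countP_map]
        congr 1
        apply List.countP_congr
        intro x _
        simp only [Function.comp, Int.toNat_natCast]
        rw [← pv_bridge x m (by omega)]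
        exact Iff.rfl
      by_cases hk : k ≤ (((nums.map (fun x => (PySem.Int.band x 4294967295).toNat)).countP
          (fun n => n.testBit m) : Nat) : Int)
      · rw [if_pos (show _ ≥ k from le_of_le_of_eq hk hcount.symm), if_pos hk]
        exact PySem.Int.bor_natCast _ _
      · rw [if_neg (show ¬ _ ≥ k from fun h => hk (le_of_le_of_eq h hcount)), if_neg hk]

lemma pv_lift_A (nums : List Int) (k : Int) :
    findKOr nums k
      = ((pvFA k (nums.map (fun x => (PySem.Int.band x 4294967295).toNat)) 32 : Nat) : Int) := by
  rw [findKOr]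
  have h32 := PySem.List.pyRange_zero_natCast 32
  norm_num at h32
  rw [h32, List.foldl_map]
  exact pv_lift_A_aux nums k 32 le_rfl

-- ===== VERDICT (by name: the statement is the Claim_ definition above) =====
theorem findKOr_spec : Claim_equal_findKOr := by
  intro nums k _
  show findKOr nums k = findKOr_alt nums k
  have hmask : ∀ x : Int, PySem.Int.band x 4294967295
      = (((PySem.Int.band x 4294967295).toNat : Nat) : Int) := by
    intro x
    rw [Int.toNat_of_nonneg]
    rw [PySem.Int.band_comm]
    exact PySem.Int.band_nonneg_of_nonneg_left x (by norm_num)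
  have hB : findKOr_alt nums k
      = ((pvGN k (nums.map (fun x => (PySem.Int.band x 4294967295).toNat)) 32 : Nat) : Int) := by
    have hlist : List.map (fun n => ((n : Nat) : Int))
        (List.map (fun x => (PySem.Int.band x 4294967295).toNat) nums)
        = List.map (fun num => PySem.Int.band num 4294967295) nums := by
      rw [List.map_map]
      apply List.map_congr_left
      intro x _
      exact (hmask x).symm
    rw [findKOr_alt, ← hlist, pv_lift_go]
  rw [hB, pv_lift_A]
  congr 1
  apply Nat.eq_of_testBit_eq
  intro j
  rw [pv_fA_testBit, pv_gN_testBit]
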